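-- pv_equiv track=rewrite | github.com/PGII33/HexMaster | level_builder.py | _compositions_identiques
-- ===== SOURCE A (Python) =====
-- def _compositions_identiques(comp1, comp2):
--     """Vérifie si deux compositions d'unités sont identiques"""
--     if len(comp1) != len(comp2):
--         return False
--
--     # Compter les occurrences de chaque classe dans chaque composition
--     count1 = {}
--     count2 = {}
--
--     for cls in comp1:
--         count1[cls] = count1.get(cls, 0) + 1
--
--     for cls in comp2:
--         count2[cls] = count2.get(cls, 0) + 1
--
--     return count1 == count2
-- ===== SOURCE B (Python) =====
-- def _compositions_identiques(comp1, comp2):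
--     """Vérifie si deux compositions d'unités sont identiques"""
--     return sorted(comp1) == sorted(comp2)
-- ===== Notes on version B (the rewrite author's own statement) =====
-- stated objective: simpler
-- what changed: Replaces the explicit length check plus two occurrence-count dicts with a single multiset comparison: sorted(comp1) == sorted(comp2).
import Mathlib
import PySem

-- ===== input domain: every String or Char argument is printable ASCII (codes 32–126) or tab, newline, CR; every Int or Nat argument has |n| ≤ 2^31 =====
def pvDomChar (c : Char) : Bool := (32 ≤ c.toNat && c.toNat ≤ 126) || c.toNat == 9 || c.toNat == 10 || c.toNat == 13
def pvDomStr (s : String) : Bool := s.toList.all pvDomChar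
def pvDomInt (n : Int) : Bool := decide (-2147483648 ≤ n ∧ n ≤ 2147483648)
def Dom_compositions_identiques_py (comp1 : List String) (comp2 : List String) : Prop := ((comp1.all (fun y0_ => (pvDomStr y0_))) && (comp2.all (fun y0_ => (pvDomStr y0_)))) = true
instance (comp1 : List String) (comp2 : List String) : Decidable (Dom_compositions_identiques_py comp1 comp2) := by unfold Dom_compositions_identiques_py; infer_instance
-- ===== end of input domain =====

-- B replaces A's length check plus two occurrence-count dicts with one multiset
-- comparison, sorted(comp1) == sorted(comp2): simpler, a single order-based pass.

-- ===== PORT A =====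
-- Python's `dict == dict` ignores insertion order: exact as "same key set, and the
-- same value at every key of the first dict" (values looked up with default 0 is
-- exact here because every compared key is present in both dicts).
def pvDictEq (d1 d2 : PySem.Dict String Int) : Bool :=
  PySem.Set.equal (PySem.Set.ofList d1.keys) (PySem.Set.ofList d2.keys) &&
    d1.keys.all (fun k => d1.getD k 0 == d2.getD k 0)

def compositions_identiques_py (comp1 : List String) (comp2 : List String) : Bool :=
  if comp1.length ≠ comp2.length then false
  else
    let count1 := comp1.foldl (fun d x => d.insert x (d.getD x 0 + 1)) PySem.Dict.empty
    let count2 := comp2.foldl (fun d x => d.insert x (d.getD x 0 + 1)) PySem.Dict.empty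
    pvDictEq count1 count2

-- ===== PORT B =====
def compositions_identiques_py_alt (comp1 : List String) (comp2 : List String) : Bool :=
  PySem.List.sorted comp1 (fun x => x) == PySem.List.sorted comp2 (fun x => x)

-- ===== PRECONDITION & SPEC =====
def Spec_compositions_identiques_py (comp1 : List String) (comp2 : List String) (out : Bool) : Prop := out = compositions_identiques_py_alt comp1 comp2
instance (comp1 : List String) (comp2 : List String) (out : Bool) : Decidable (Spec_compositions_identiques_py comp1 comp2 out) := by unfold Spec_compositions_identiques_py; infer_instance

-- ===== CLAIM (what is proved, stated in full; the proofs are below) =====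
def Claim_equal_compositions_identiques_py : Prop := ∀ (comp1 : List String) (comp2 : List String), Dom_compositions_identiques_py comp1 comp2 → Spec_compositions_identiques_py comp1 comp2 (compositions_identiques_py comp1 comp2)

-- ===== LEMMAS AND PROOFS =====

-- A's occurrence-dict comparison decides permutation equivalence.
theorem pvA_eq_decide_perm (l1 l2 : List String) :
    compositions_identiques_py l1 l2 = decide (l1.Perm l2) := by
  unfold compositions_identiques_py
  by_cases hl : l1.length = l2.length
  · simp only [hl, ne_eq, not_true_eq_false, if_false]
    rw [PySem.Dict.foldl_insert_getD_add_one_eq_counter,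
        PySem.Dict.foldl_insert_getD_add_one_eq_counter]
    rw [Bool.eq_iff_iff, decide_eq_true_eq]
    unfold pvDictEq
    rw [Bool.and_eq_true, PySem.Set.equal_iff, List.all_eq_true, List.perm_iff_count]
    constructor
    · rintro ⟨hkeys, hvals⟩ v
      by_cases hv : v ∈ l1
      · have hk : v ∈ (PySem.Dict.counter l1).keys := by
          rw [PySem.Dict.keys_counter, PySem.Set.mem_ofList]; exact hv
        have := hvals v hk
        rw [beq_iff_eq, PySem.Dict.getD_counter, PySem.Dict.getD_counter] at this
        exact_mod_cast this
      · have hv2 : v ∉ l2 := by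
          intro h2
          apply hv
          have hmem : v ∈ PySem.Set.ofList (PySem.Dict.counter l2).keys := by
            rw [PySem.Set.mem_ofList, PySem.Dict.keys_counter, PySem.Set.mem_ofList]
            exact h2
          have := (hkeys v).2 hmem
          rw [PySem.Set.mem_ofList, PySem.Dict.keys_counter, PySem.Set.mem_ofList] at this
          exact this
        rw [List.count_eq_zero_of_not_mem hv, List.count_eq_zero_of_not_mem hv2]
    · intro hcnt
      constructor
      · intro v
        rw [PySem.Dict.keys_counter, PySem.Dict.keys_counter, PySem.Set.mem_ofList,
            PySem.Set.mem_ofList, PySem.Set.mem_ofList, PySem.Set.mem_ofList]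
        rw [← List.count_pos_iff, ← List.count_pos_iff, hcnt v]
      · intro k _
        rw [beq_iff_eq, PySem.Dict.getD_counter, PySem.Dict.getD_counter]
        exact_mod_cast hcnt k
  · simp only [hl, ne_eq, not_false_eq_true, if_true]
    symm
    rw [decide_eq_false_iff_not]
    exact fun h => hl h.length_eq

theorem pvB_eq_decide_perm (l1 l2 : List String) :
    compositions_identiques_py_alt l1 l2 = decide (l1.Perm l2) := by
  unfold compositions_identiques_py_alt
  rw [Bool.eq_iff_iff, beq_iff_eq, decide_eq_true_eq]
  exact PySem.List.sorted_id_eq_sorted_id_iff_perm l1 l2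

-- ===== VERDICT (by name: the statement is the Claim_ definition above) =====
theorem compositions_identiques_py_spec : Claim_equal_compositions_identiques_py := by
  intro comp1 comp2 _
  unfold Spec_compositions_identiques_py
  rw [pvA_eq_decide_perm, pvB_eq_decide_perm]
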